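-- pv_equiv track=rewrite | github.com/erwanp/ctwrap | ctwrap/strategy.py | _task_list
-- ===== SOURCE A (Python) =====
-- def _task_list(tasks, prefix=None):
--     """Create list of tasks (recursive)
--
--     Arguments:
--        tasks: Dictionary of variations
--     """
--     key = list(tasks.keys())[0]
--     next = tasks.copy()
--     values = next.pop(key)
--
--     out = []
--     for value in values:
--         new = '{}_{}'.format(key, value)
--         if prefix:
--             new = '{}_{}'.format(prefix, new)
--         if next:
--             out.extend(_task_list(next, new))
--         else:
--             out.append(new)
--
--     return out
-- ===== SOURCE B (Python) =====
-- def _task_list(tasks, prefix=None):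
--     """Create list of tasks (iterative Cartesian product)."""
--     keys = list(tasks.keys())
--     combos = [[]]
--     for k in keys:
--         combos = [combo + [v] for combo in combos for v in tasks[k]]
--     out = []
--     for combo in combos:
--         name = '_'.join('{}_{}'.format(k, v) for k, v in zip(keys, combo))
--         if prefix:
--             name = '{}_{}'.format(prefix, name)
--         out.append(name)
--     return out
-- ===== Notes on version B (the rewrite author's own statement) =====
-- stated objective: idiomatic
-- what changed: Replaces A's one-key-at-a-time recursion (threading the growing name through the prefix argument) with an iterative Cartesian-product construction followed by a single join/formatting pass over each combination.
import Mathlib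
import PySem

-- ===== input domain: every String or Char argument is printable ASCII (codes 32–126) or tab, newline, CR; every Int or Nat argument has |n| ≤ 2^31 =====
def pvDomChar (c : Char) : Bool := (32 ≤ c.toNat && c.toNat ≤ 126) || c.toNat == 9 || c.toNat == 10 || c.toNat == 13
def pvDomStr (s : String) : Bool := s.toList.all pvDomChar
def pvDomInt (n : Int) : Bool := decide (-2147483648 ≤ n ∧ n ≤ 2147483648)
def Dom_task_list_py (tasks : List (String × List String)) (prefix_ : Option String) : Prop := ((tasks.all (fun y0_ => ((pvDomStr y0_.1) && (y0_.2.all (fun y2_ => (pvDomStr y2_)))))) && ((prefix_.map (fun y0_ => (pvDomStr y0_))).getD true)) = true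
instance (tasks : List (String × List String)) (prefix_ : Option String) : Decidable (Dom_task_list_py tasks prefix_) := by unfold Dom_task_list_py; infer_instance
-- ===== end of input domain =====

-- B replaces A's one-key-at-a-time recursion with an iterative Cartesian-product build plus one join pass (idiomatic; same cost).
-- The dict `tasks` is an association list; Pre_ requires tasks ≠ [] (A raises IndexError on {}) and distinct keys (a Python dict cannot hold duplicates).

-- helpers shared by both ports, straight from the shared Python source lines:
-- '{}_{}'.format(a, b)
def join2 (a b : String) : String := PySem.Str.join "_" [a, b]
-- "if prefix: name = '{}_{}'.format(prefix, name)" — Python truthiness of an optional string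
def applyPref (p : Option String) (s : String) : String :=
  match p with
  | some q => if q ≠ "" then join2 q s else s
  | none => s

-- ===== PORT A =====
-- literal port of the recursive _task_list
def task_list_py (tasks : List (String × List String)) (prefix_ : Option String) : List String :=
  match tasks with
  | [] => []  -- Python raises IndexError here (list(tasks.keys())[0]); excluded by Pre_
  | (key, values) :: next =>
    values.foldl (fun out value =>
      let new := applyPref prefix_ (join2 key value)
      if next ≠ [] then out ++ task_list_py next (some new)
      else out ++ [new]) []
termination_by tasks.length
decreasing_by simp

-- ===== PORT B =====
-- "'_'.join('{}_{}'.format(k, v) for k, v in zip(keys, combo))"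
def nameOf (keys combo : List String) : String :=
  PySem.Str.join "_" ((keys.zip combo).map (fun kv => join2 kv.1 kv.2))

def task_list_py_alt (tasks : List (String × List String)) (prefix_ : Option String) : List String :=
  let keys := tasks.map Prod.fst
  -- combos = [[]]; for k in keys: combos = [combo + [v] for combo in combos for v in tasks[k]]
  let combos := tasks.foldl (fun combos kv => combos.flatMap (fun c => kv.2.map (fun v => c ++ [v]))) [[]]
  combos.foldl (fun out combo => out ++ [applyPref prefix_ (nameOf keys combo)]) []

-- ===== PRECONDITION & SPEC =====
-- Pre_ excludes the empty dict, on which A raises IndexError, and association lists with duplicate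
-- keys, which a Python dict cannot represent (a dict literal silently collapses them).
def Pre_task_list_py (tasks : List (String × List String)) (prefix_ : Option String) : Prop :=
  tasks ≠ [] ∧ (tasks.map Prod.fst).Nodup
instance (tasks : List (String × List String)) (prefix_ : Option String) : Decidable (Pre_task_list_py tasks prefix_) := by unfold Pre_task_list_py; infer_instance

def pvWitness_task_list_py : (List (String × List String)) × Option String :=
  ([("a", ["1", "2"]), ("b", ["x"])], some "p")

def Spec_task_list_py (tasks : List (String × List String)) (prefix_ : Option String) (out : List String) : Prop := out = task_list_py_alt tasks prefix_
instance (tasks : List (String × List String)) (prefix_ : Option String) (out : List String) : Decidable (Spec_task_list_py tasks prefix_ out) := by unfold Spec_task_list_py; infer_instance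

-- ===== CLAIM (what is proved, stated in full; the proofs are below) =====
def Claim_equal_task_list_py : Prop := ∀ (tasks : List (String × List String)) (prefix_ : Option String), Dom_task_list_py tasks prefix_ → Pre_task_list_py tasks prefix_ → Spec_task_list_py tasks prefix_ (task_list_py tasks prefix_)

-- ===== LEMMAS AND PROOFS =====

-- proof-side recursive Cartesian product (first list slowest-varying)
def prodR : List (List String) → List (List String)
  | [] => [[]]
  | p :: ps => p.flatMap (fun v => (prodR ps).map (v :: ·))

lemma join2_toList (a b : String) : (join2 a b).toList = a.toList ++ '_' :: b.toList := by
  simp [join2, PySem.Str.toList_join, PySem.Chars.join_cons_cons, PySem.Chars.join_singleton]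

lemma join2_ne_empty (a b : String) : join2 a b ≠ "" := by
  intro h
  have := join2_toList a b
  rw [h] at this
  simp at this

lemma applyPref_ne_empty (p : Option String) (a b : String) : applyPref p (join2 a b) ≠ "" := by
  cases p with
  | none => exact join2_ne_empty a b
  | some q =>
    simp only [applyPref]
    split
    · exact join2_ne_empty _ _
    · exact join2_ne_empty a b

lemma join2_assoc (a b c : String) : join2 a (join2 b c) = join2 (join2 a b) c := by
  rw [← String.toList_inj]
  simp [join2_toList]

lemma applyPref_join2 (p : Option String) (a b : String) :
    applyPref p (join2 a b) = join2 (applyPref p a) b := by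
  cases p with
  | none => rfl
  | some q =>
    simp only [applyPref]
    split
    · exact join2_assoc q a b
    · rfl

lemma applyPref_some_of_ne (x s : String) (h : x ≠ "") :
    applyPref (some x) s = join2 x s := by
  simp only [applyPref]
  rw [if_pos h]

lemma nameOf_cons (k : String) (keys' : List String) (v : String) (combo' : List String)
    (h : keys' ≠ []) (h' : combo' ≠ []) :
    nameOf (k :: keys') (v :: combo') = join2 (join2 k v) (nameOf keys' combo') := by
  cases keys' with
  | nil => exact absurd rfl h
  | cons k2 ks =>
    cases combo' with
    | nil => exact absurd rfl h'
    | cons v2 cs =>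
      rw [← String.toList_inj]
      simp only [nameOf, List.zip_cons_cons, List.map_cons, PySem.Str.toList_join,
        PySem.Chars.join_cons_cons, join2_toList]
      simp

lemma nameOf_single (k v : String) : nameOf [k] [v] = join2 k v := by
  rw [← String.toList_inj]
  simp [nameOf, PySem.Str.toList_join, PySem.Chars.join_singleton]

lemma mem_prodR_ne_nil {ps : List (List String)} (h : ps ≠ []) {t : List String}
    (ht : t ∈ prodR ps) : t ≠ [] := by
  cases ps with
  | nil => exact absurd rfl h
  | cons p ps' =>
    simp only [prodR, List.mem_flatMap, List.mem_map] at ht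
    obtain ⟨v, _, t', _, rfl⟩ := ht
    simp

-- A in product normal form
lemma task_list_py_eq_map (tasks : List (String × List String)) (p : Option String)
    (h : tasks ≠ []) :
    task_list_py tasks p =
      (prodR (tasks.map Prod.snd)).map (fun t => applyPref p (nameOf (tasks.map Prod.fst) t)) := by
  induction tasks generalizing p with
  | nil => exact absurd rfl h
  | cons kv next ih =>
    obtain ⟨key, values⟩ := kv
    rw [task_list_py]
    by_cases hn : next = []
    · subst hn
      simp only [ne_eq, not_true_eq_false, if_false, List.map_cons, List.map_nil]
      rw [PySem.List.foldl_append_singleton_eq_map, List.nil_append]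
      clear h ih
      have hpr : prodR [values] = values.map (fun v => [v]) := by
        simp only [prodR]
        induction values with
        | nil => rfl
        | cons a l ihv => simp_all
      rw [hpr, List.map_map]
      apply List.map_congr_left
      intro v _
      simp only [Function.comp_apply]
      rw [nameOf_single]
    · simp only [ne_eq, hn, not_false_eq_true, if_true, List.map_cons]
      rw [PySem.List.foldl_append_eq_flatMap, List.nil_append]
      simp only [prodR, List.map_flatMap]
      apply List.flatMap_congr
      intro v _
      rw [ih _ hn, List.map_map]
      apply List.map_congr_left
      intro t ht
      have htne : t ≠ [] := mem_prodR_ne_nil (by simpa using hn) ht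
      have hkne : next.map Prod.fst ≠ [] := by simpa using hn
      simp only [Function.comp_apply]
      rw [nameOf_cons key _ v t hkne htne,
        applyPref_join2 p (join2 key v) (nameOf (next.map Prod.fst) t),
        applyPref_some_of_ne _ _ (applyPref_ne_empty p key v)]

-- B in product normal form
lemma foldl_combos (tasks : List (String × List String)) (acc : List (List String)) :
    tasks.foldl (fun combos kv => combos.flatMap (fun c => kv.2.map (fun v => c ++ [v]))) acc
      = acc.flatMap (fun c => (prodR (tasks.map Prod.snd)).map (fun t => c ++ t)) := by
  induction tasks generalizing acc with
  | nil => simp [prodR]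
  | cons kv next ih =>
    rw [List.foldl_cons, ih, List.flatMap_assoc]
    simp only [List.map_cons, prodR]
    apply List.flatMap_congr
    intro c _
    rw [List.flatMap_map, List.map_flatMap]
    apply List.flatMap_congr
    intro v _
    rw [List.map_map]
    apply List.map_congr_left
    intro t _
    simp [List.append_assoc]

lemma task_list_py_alt_eq_map (tasks : List (String × List String)) (p : Option String) :
    task_list_py_alt tasks p =
      (prodR (tasks.map Prod.snd)).map (fun t => applyPref p (nameOf (tasks.map Prod.fst) t)) := by
  unfold task_list_py_alt
  rw [foldl_combos, PySem.List.foldl_append_singleton_eq_map, List.nil_append]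
  simp [List.flatMap_cons]

-- ===== VERDICT (by name: the statement is the Claim_ definition above) =====
theorem task_list_py_spec : Claim_equal_task_list_py := by
  intro tasks prefix_ _ hpre
  unfold Spec_task_list_py
  rw [task_list_py_eq_map tasks prefix_ hpre.1, task_list_py_alt_eq_map]
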